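-- pv_equiv track=rewrite | github.com/genepattern/nmf-gpu | bin/consensus.unified.py | divide_almost_equally
-- ===== SOURCE A (Python) =====
-- import heapq
--
-- def divide_almost_equally(arr, num_chunks):
--     arr = sorted(arr, reverse=True)
--     heap = [(0, idx) for idx in range(num_chunks)]
--     heapq.heapify(heap)
--     sets = {}
--     for i in range(num_chunks):
--         sets[i] = []
--     arr_idx = 0
--     while arr_idx < len(arr):
--         set_sum, set_idx = heapq.heappop(heap)
--         sets[set_idx].append(arr[arr_idx])
--         set_sum += arr[arr_idx]
--         heapq.heappush(heap, (set_sum, set_idx))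
--         arr_idx += 1
--     return list(sets.values())
-- ===== SOURCE B (Python) =====
-- def divide_almost_equally(arr, num_chunks):
--     sums = [0] * num_chunks
--     sets = [[] for _ in range(num_chunks)]
--     for x in sorted(arr, reverse=True):
--         j = 0
--         for i in range(1, num_chunks):
--             if sums[i] < sums[j]:
--                 j = i
--         sets[j].append(x)
--         sums[j] += x
--     return sets
-- ===== Notes on version B (the rewrite author's own statement) =====
-- stated objective: simpler
-- what changed: Replaces the heap of (sum, index) pairs and the index-keyed dict with a plain list of buckets and a parallel list of sums, picking the target bucket by a direct strict-less argmin scan (ties keep the lowest index, exactly the heap's tie-break).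
import Mathlib
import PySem

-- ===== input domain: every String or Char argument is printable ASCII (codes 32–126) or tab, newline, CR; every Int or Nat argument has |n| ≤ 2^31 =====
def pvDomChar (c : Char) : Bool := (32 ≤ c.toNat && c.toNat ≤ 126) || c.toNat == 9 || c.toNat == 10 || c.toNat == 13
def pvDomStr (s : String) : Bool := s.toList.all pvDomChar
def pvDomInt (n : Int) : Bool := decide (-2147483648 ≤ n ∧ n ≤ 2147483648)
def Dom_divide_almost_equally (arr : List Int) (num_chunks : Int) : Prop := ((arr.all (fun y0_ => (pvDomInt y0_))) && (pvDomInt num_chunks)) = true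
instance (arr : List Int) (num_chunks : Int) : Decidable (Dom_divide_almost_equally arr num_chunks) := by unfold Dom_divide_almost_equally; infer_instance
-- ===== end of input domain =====

-- B replaces A's heap of (sum, idx) pairs and index-keyed dict with a plain list of buckets plus a
-- parallel list of sums and a strict-less argmin scan (same tie-break); objective: simpler.

-- ===== PORT A =====
-- pvMin2 / pvHeapPopMin model heapq exactly at the level of returned values: heappop returns the
-- lexicographically smallest (sum, idx) pair of the heap (all pairs in this program are distinct,
-- so that value is unique and independent of the heap's internal array layout); heappush adds a pair.
def pvMin2 (p q : Int × Int) : Int × Int :=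
  if q.1 < p.1 ∨ (q.1 = p.1 ∧ q.2 < p.2) then q else p

def pvPopStep (acc : Option (Int × Int)) (p : Int × Int) : Option (Int × Int) :=
  some (match acc with | none => p | some q => pvMin2 q p)

def pvHeapPopMin (h : List (Int × Int)) : Option (Int × Int) :=
  h.foldl pvPopStep none

-- the `while arr_idx < len(arr)` loop of A, one element of arr per step
def pvALoop : List Int → List (Int × Int) → PySem.Dict Int (List Int) → PySem.Dict Int (List Int)
  | [], _, d => d
  | x :: xs, h, d =>
    match pvHeapPopMin h with
    | none => d   -- heappop on an empty heap: Python raises IndexError (excluded by Pre_)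
    -- sets[set_idx].append(x): the key is always present, so modify with default [] is exact
    | some (s, j) => pvALoop xs (h.erase (s, j) ++ [(s + x, j)]) (d.modify j [] (fun l => l ++ [x]))

def divide_almost_equally (arr : List Int) (num_chunks : Int) : List (List Int) :=
  let arr' := PySem.List.sorted arr (fun x => x) true
  let heap := (PySem.List.pyRange 0 num_chunks).map (fun idx => ((0 : Int), idx))
  let sets := (PySem.List.pyRange 0 num_chunks).foldl
      (fun d i => d.insert i ([] : List Int)) PySem.Dict.empty
  PySem.Dict.values (pvALoop arr' heap sets)

-- ===== PORT B =====
-- the inner `for i in range(1, num_chunks)` argmin scan of Source B (Nat indices; every index the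
-- Python touches is in range, so getD with default 0 is exact)
def pvArgmin (sums : List Int) (k : Nat) : Nat :=
  (List.range' 1 (k - 1)).foldl (fun j i => if sums.getD i 0 < sums.getD j 0 then i else j) 0

-- the `for x in sorted(arr, reverse=True)` loop of Source B
def pvBLoop (k : Nat) : List Int → List Int → List (List Int) → List (List Int)
  | [], _, sets => sets
  | x :: xs, sums, sets =>
    let j := pvArgmin sums k
    pvBLoop k xs (sums.set j (sums.getD j 0 + x)) (sets.set j (sets.getD j [] ++ [x]))

def divide_almost_equally_alt (arr : List Int) (num_chunks : Int) : List (List Int) :=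
  let k := num_chunks.toNat
  pvBLoop k (PySem.List.sorted arr (fun x => x) true) (List.replicate k 0) (List.replicate k [])

-- ===== PRECONDITION & SPEC =====
-- Pre_ excludes exactly the inputs where A raises: nonempty arr with num_chunks ≤ 0
-- (heappop from an empty heap, IndexError); B raises IndexError there too.
def Pre_divide_almost_equally (arr : List Int) (num_chunks : Int) : Prop :=
  arr = [] ∨ 1 ≤ num_chunks

instance (arr : List Int) (num_chunks : Int) : Decidable (Pre_divide_almost_equally arr num_chunks) := by
  unfold Pre_divide_almost_equally; infer_instance

def pvWitness_divide_almost_equally : List Int × Int := ([5, 3, 2], 2)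

def Spec_divide_almost_equally (arr : List Int) (num_chunks : Int) (out : List (List Int)) : Prop :=
  out = divide_almost_equally_alt arr num_chunks

instance (arr : List Int) (num_chunks : Int) (out : List (List Int)) :
    Decidable (Spec_divide_almost_equally arr num_chunks out) := by
  unfold Spec_divide_almost_equally; infer_instance

-- ===== CLAIM =====
def Claim_equal_divide_almost_equally : Prop :=
  ∀ (arr : List Int) (num_chunks : Int), Dom_divide_almost_equally arr num_chunks →
    Pre_divide_almost_equally arr num_chunks →
    Spec_divide_almost_equally arr num_chunks (divide_almost_equally arr num_chunks)

-- ===== LEMMAS AND PROOFS =====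

-- the pair (bucket sum, bucket index) held for bucket i
def pvPair (sums : List Int) (i : Nat) : Int × Int := (sums.getD i 0, (i : Int))

theorem pvMin2_leftcomm (q x y : Int × Int) : pvMin2 (pvMin2 q x) y = pvMin2 (pvMin2 q y) x := by
  obtain ⟨a, b⟩ := q; obtain ⟨c, d⟩ := x; obtain ⟨e, f⟩ := y
  simp only [pvMin2]
  split_ifs <;> simp_all [Prod.mk.injEq] <;> omega

theorem pvPopStep_comm (z : Option (Int × Int)) (x y : Int × Int) :
    pvPopStep (pvPopStep z x) y = pvPopStep (pvPopStep z y) x := by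
  cases z with
  | none =>
      simp only [pvPopStep]
      obtain ⟨a, b⟩ := x; obtain ⟨c, d⟩ := y
      simp only [pvMin2]
      split_ifs <;> simp_all [Prod.mk.injEq] <;> omega
  | some q => simp only [pvPopStep, pvMin2_leftcomm]

theorem pvHeapPopMin_perm {h1 h2 : List (Int × Int)} (hp : h1.Perm h2) :
    pvHeapPopMin h1 = pvHeapPopMin h2 :=
  List.Perm.foldl_eq' hp (fun x _ y _ z => pvPopStep_comm z x y) none

theorem foldl_popStep_some (t : List (Int × Int)) (q : Int × Int) :
    t.foldl pvPopStep (some q) = some (t.foldl pvMin2 q) := by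
  induction t generalizing q with
  | nil => rfl
  | cons p t ih => simp only [List.foldl_cons, pvPopStep, ih]

-- the argmin scan result stays in the candidate range
theorem pvScan_bound (sums : List Int) (k : Nat) :
    ∀ (l : List Nat) (j0 : Nat), (∀ i ∈ l, i < k) → j0 < k →
      l.foldl (fun j i => if sums.getD i 0 < sums.getD j 0 then i else j) j0 < k := by
  intro l
  induction l with
  | nil => intro j0 _ hj; exact hj
  | cons i t ih =>
      intro j0 hl hj
      simp only [List.foldl_cons]
      split_ifs
      · exact ih i (fun m hm => hl m (List.mem_cons_of_mem _ hm)) (hl i (List.mem_cons_self ..))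
      · exact ih j0 (fun m hm => hl m (List.mem_cons_of_mem _ hm)) hj

-- B's strict-less scan computes exactly the lexicographic minimum of the (sum, index) pairs:
-- every index seen later is larger, so ties keep the earlier index.
theorem pvScan_min (sums : List Int) :
    ∀ (l : List Nat) (j0 : Nat), (∀ i ∈ l, j0 < i) → l.Pairwise (· < ·) →
      (l.map (pvPair sums)).foldl pvMin2 (pvPair sums j0)
        = pvPair sums (l.foldl (fun j i => if sums.getD i 0 < sums.getD j 0 then i else j) j0) := by
  intro l
  induction l with
  | nil => intro j0 _ _; rfl
  | cons i t ih =>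
      intro j0 hgt hpw
      have hji : j0 < i := hgt i (List.mem_cons_self ..)
      have hpw' : t.Pairwise (· < ·) := hpw.of_cons
      have hti : ∀ m ∈ t, i < m := fun m hm => (List.pairwise_cons.mp hpw).1 m hm
      simp only [List.map_cons, List.foldl_cons]
      have hstep : pvMin2 (pvPair sums j0) (pvPair sums i)
          = pvPair sums (if sums.getD i 0 < sums.getD j0 0 then i else j0) := by
        simp only [pvMin2, pvPair]
        split_ifs <;> simp_all <;> omega
      rw [hstep]
      split_ifs with hc
      · exact ih i hti hpw'
      · exact ih j0 (fun m hm => lt_trans hji (hti m hm)) hpw'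

-- popping the modelled heap of all k pairs returns the pair of B's argmin index
theorem pvHeapPopMin_range (sums : List Int) (k : Nat) (hk : 0 < k) :
    pvHeapPopMin ((List.range k).map (pvPair sums)) = some (pvPair sums (pvArgmin sums k)) := by
  obtain ⟨m, rfl⟩ : ∃ m, k = m + 1 := ⟨k - 1, by omega⟩
  have hr : List.range (m + 1) = 0 :: List.range' 1 m := by
    rw [List.range_eq_range', List.range'_succ]
  rw [hr]
  simp only [List.map_cons, pvHeapPopMin, List.foldl_cons]
  show (List.map (pvPair sums) (List.range' 1 m)).foldl pvPopStep (pvPopStep none (pvPair sums 0)) =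
    some (pvPair sums (pvArgmin sums (m + 1)))
  have h0 : pvPopStep none (pvPair sums 0) = some (pvPair sums 0) := rfl
  rw [h0, foldl_popStep_some]
  rw [pvScan_min sums (List.range' 1 m) 0
        (fun i hi => (List.mem_range'_1.mp hi).1)
        (List.pairwise_lt_range' 1)]
  simp [pvArgmin]

theorem pvArgmin_lt (sums : List Int) (k : Nat) (hk : 0 < k) : pvArgmin sums k < k := by
  unfold pvArgmin
  exact pvScan_bound sums k _ 0 (fun i hi => by have := List.mem_range'_1.mp hi; omega) hk

theorem pvGetD_set_ne {α : Type} [Inhabited α] (l : List α) (i j : Nat) (v d : α) (h : j ≠ i) :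
    (l.set j v).getD i d = l.getD i d := by
  simp only [List.getD_eq_getElem?_getD, List.getElem?_set_ne h]

theorem pvGetD_set_self {α : Type} (l : List α) (j : Nat) (v d : α) (h : j < l.length) :
    (l.set j v).getD j d = v := by
  simp only [List.getD_eq_getElem?_getD, List.getElem?_set_self h, Option.getD_some]

-- updating bucket j: erasing its old pair and appending the new one is, up to permutation,
-- remapping the range with the updated sums
theorem pvHeap_update_perm (sums : List Int) (k j : Nat) (x : Int)
    (hj : j < k) (hlen : sums.length = k) :
    ((((List.range k).map (pvPair sums)).erase (pvPair sums j)) ++ [(sums.getD j 0 + x, (j : Int))]).Perm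
      ((List.range k).map (pvPair (sums.set j (sums.getD j 0 + x)))) := by
  have hsplit : List.range k = List.range' 0 j ++ j :: List.range' (j + 1) (k - j - 1) := by
    rw [List.range_eq_range']
    have h1 : List.range' 0 j ++ List.range' (0 + 1 * j) (k - j) = List.range' 0 (j + (k - j)) :=
      List.range'_append
    have h2 : j + (k - j) = k := by omega
    have h3 : k - j = (k - j - 1) + 1 := by omega
    rw [h2] at h1
    rw [← h1, h3, List.range'_succ]
    norm_num
  have hgd_ne : ∀ i : Nat, i ≠ j → (sums.set j (sums.getD j 0 + x)).getD i 0 = sums.getD i 0 :=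
    fun i hne => pvGetD_set_ne sums i j _ 0 (Ne.symm hne)
  have hgd_j : (sums.set j (sums.getD j 0 + x)).getD j 0 = sums.getD j 0 + x :=
    pvGetD_set_self sums j _ 0 (hlen ▸ hj)
  have hmapne : ∀ (l : List Nat), (∀ i ∈ l, i ≠ j) →
      l.map (pvPair (sums.set j (sums.getD j 0 + x))) = l.map (pvPair sums) := by
    intro l hl
    exact List.map_congr_left (fun i hi => by simp only [pvPair, hgd_ne i (hl i hi)])
  have hL1 : (List.range' 0 j).map (pvPair (sums.set j (sums.getD j 0 + x))) = (List.range' 0 j).map (pvPair sums) :=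
    hmapne _ (fun i hi => by have := List.mem_range'_1.mp hi; omega)
  have hL2 : (List.range' (j + 1) (k - j - 1)).map (pvPair (sums.set j (sums.getD j 0 + x)))
      = (List.range' (j + 1) (k - j - 1)).map (pvPair sums) :=
    hmapne _ (fun i hi => by have := List.mem_range'_1.mp hi; omega)
  have hnotmem : pvPair sums j ∉ (List.range' 0 j).map (pvPair sums) := by
    intro hmem
    obtain ⟨i, hi, hip⟩ := List.mem_map.mp hmem
    have hi' := List.mem_range'_1.mp hi
    have : (i : Int) = (j : Int) := congrArg Prod.snd hip
    omega
  rw [hsplit]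
  simp only [List.map_append, List.map_cons]
  rw [List.erase_append_right _ hnotmem, List.erase_cons_head]
  rw [hL1, hL2]
  have hpj' : pvPair (sums.set j (sums.getD j 0 + x)) j = (sums.getD j 0 + x, (j : Int)) := by
    simp only [pvPair]
    rw [hgd_j]
  rw [hpj']
  exact (List.perm_append_singleton _ _).trans List.perm_middle.symm

-- the dict invariant: A's dict is literally the range-indexed view of B's bucket list
def pvDictOf (k : Nat) (sets : List (List Int)) : PySem.Dict Int (List Int) :=
  { items := (List.range k).map (fun i : Nat => ((i : Int), sets.getD i [])) }

theorem pvDictOf_keys (k : Nat) (sets : List (List Int)) :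
    (pvDictOf k sets).keys = (List.range k).map (fun i : Nat => (i : Int)) := by
  simp only [pvDictOf, PySem.Dict.keys_mk, List.map_map]
  rfl

theorem pvDictOf_keys_nodup (k : Nat) (sets : List (List Int)) :
    (pvDictOf k sets).keys.Nodup := by
  rw [pvDictOf_keys]
  have hinj : Function.Injective (fun i : Nat => (i : Int)) := fun a b hab => by simpa using hab
  exact List.Nodup.map hinj List.nodup_range

theorem pvDictOf_modify (k j : Nat) (sets : List (List Int)) (x : Int)
    (hj : j < k) (hlen : sets.length = k) :
    (pvDictOf k sets).modify (j : Int) [] (fun l => l ++ [x])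
      = pvDictOf k (sets.set j (sets.getD j [] ++ [x])) := by
  have hcont : (pvDictOf k sets).contains (j : Int) = true := by
    rw [PySem.Dict.contains_iff_mem_keys, pvDictOf_keys]
    exact List.mem_map.mpr ⟨j, List.mem_range.mpr hj, rfl⟩
  have hmem : ((j : Int), sets.getD j []) ∈ (pvDictOf k sets).items :=
    List.mem_map.mpr ⟨j, List.mem_range.mpr hj, rfl⟩
  have hget : (pvDictOf k sets).getD (j : Int) [] = sets.getD j [] :=
    PySem.Dict.getD_of_mem_items _ hmem (pvDictOf_keys_nodup k sets) _
  apply PySem.Dict.ext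
  show ((pvDictOf k sets).insert (j : Int) ((pvDictOf k sets).getD (j : Int) [] ++ [x])).items = _
  rw [PySem.Dict.items_insert_of_contains _ _ hcont, hget]
  show ((List.range k).map (fun i : Nat => ((i : Int), sets.getD i []))).map _ = _
  rw [List.map_map]
  apply List.map_congr_left
  intro i hi
  have hik := List.mem_range.mp hi
  by_cases hij : i = j
  · subst hij
    simp only [Function.comp_apply, beq_self_eq_true, if_pos]
    rw [pvGetD_set_self _ _ _ _ (hlen ▸ hj)]
  · have hbeq : ((i : Int) == (j : Int)) = false := by
      simp only [beq_eq_false_iff_ne, ne_eq, Int.natCast_inj]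
      exact hij
    simp only [Function.comp_apply, hbeq, Bool.false_eq_true, if_false]
    rw [pvGetD_set_ne _ _ _ _ _ (Ne.symm hij)]

theorem pvDictOf_values (k : Nat) (sets : List (List Int)) (hlen : sets.length = k) :
    (pvDictOf k sets).values = sets := by
  show (((List.range k).map (fun i : Nat => ((i : Int), sets.getD i []))).map (fun p => p.2)) = sets
  rw [List.map_map]
  subst hlen
  apply List.ext_getElem (by simp)
  intro i h1 h2
  simp [List.getD_eq_getElem?_getD, List.getElem?_eq_getElem h2]

-- the main loop invariant: with heap ≈ pairs of sums and dict = view of sets, both loops agree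
theorem pvLoop_eq (k : Nat) (hk : 0 < k) :
    ∀ (xs sums : List Int) (sets : List (List Int)) (h : List (Int × Int)),
      sums.length = k → sets.length = k →
      h.Perm ((List.range k).map (pvPair sums)) →
      PySem.Dict.values (pvALoop xs h (pvDictOf k sets)) = pvBLoop k xs sums sets := by
  intro xs
  induction xs with
  | nil =>
      intro sums sets h _ hsets _
      exact pvDictOf_values k sets hsets
  | cons x xs ih =>
      intro sums sets h hsums hsets hperm
      have hjk : pvArgmin sums k < k := pvArgmin_lt sums k hk
      have hpop : pvHeapPopMin h = some (pvPair sums (pvArgmin sums k)) :=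
        (pvHeapPopMin_perm hperm).trans (pvHeapPopMin_range sums k hk)
      show PySem.Dict.values
          (match pvHeapPopMin h with
            | none => pvDictOf k sets
            | some (s, j) => pvALoop xs (h.erase (s, j) ++ [(s + x, j)])
                ((pvDictOf k sets).modify j [] (fun l => l ++ [x]))) = _
      rw [hpop]
      show PySem.Dict.values
          (pvALoop xs (h.erase (pvPair sums (pvArgmin sums k))
              ++ [(sums.getD (pvArgmin sums k) 0 + x, ((pvArgmin sums k) : Int))])
            ((pvDictOf k sets).modify ((pvArgmin sums k) : Int) [] (fun l => l ++ [x]))) = _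
      rw [pvDictOf_modify k (pvArgmin sums k) sets x hjk hsets]
      rw [ih (sums.set (pvArgmin sums k) (sums.getD (pvArgmin sums k) 0 + x))
            (sets.set (pvArgmin sums k) (sets.getD (pvArgmin sums k) [] ++ [x]))
            _
            (by rw [List.length_set]; exact hsums)
            (by rw [List.length_set]; exact hsets)
            (((hperm.erase _).append_right _).trans
              (pvHeap_update_perm sums k (pvArgmin sums k) x hjk hsums))]
      rfl

-- the two initial states are literally equal views of each other
theorem pvHeap_init (nc : Int) :
    (PySem.List.pyRange 0 nc).map (fun idx => ((0 : Int), idx))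
      = (List.range nc.toNat).map (pvPair (List.replicate nc.toNat 0)) := by
  rw [PySem.List.pyRange_zero, List.map_map]
  apply List.map_congr_left
  intro i hi
  simp only [Function.comp_apply, pvPair]
  rw [List.getD_replicate _ (List.mem_range.mp hi)]

theorem pvDict_init (nc : Int) :
    (PySem.List.pyRange 0 nc).foldl (fun d i => d.insert i ([] : List Int)) PySem.Dict.empty
      = pvDictOf nc.toNat (List.replicate nc.toNat []) := by
  apply PySem.Dict.ext
  rw [PySem.Dict.items_foldl_insert_fresh (PySem.List.pyRange 0 nc) (fun i => i)
        (fun _ => ([] : List Int)) PySem.Dict.empty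
        (fun a _ => PySem.Dict.contains_empty a)
        (by rw [List.map_id_fun']; exact PySem.List.nodup_pyRange_one 0 nc)]
  show [] ++ (PySem.List.pyRange 0 nc).map (fun i => (i, ([] : List Int))) = _
  rw [List.nil_append, PySem.List.pyRange_zero, List.map_map]
  apply List.map_congr_left
  intro i hi
  simp only [Function.comp_apply]
  rw [List.getD_replicate _ (List.mem_range.mp hi)]

theorem divide_almost_equally_spec : Claim_equal_divide_almost_equally := by
  intro arr nc _ hpre
  unfold Spec_divide_almost_equally divide_almost_equally divide_almost_equally_alt
  by_cases hk : 0 < nc.toNat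
  · rw [pvDict_init nc]
    exact pvLoop_eq nc.toNat hk (PySem.List.sorted arr (fun x => x) true)
      (List.replicate nc.toNat 0) (List.replicate nc.toNat []) _
      (List.length_replicate) (List.length_replicate)
      (by rw [pvHeap_init nc])
  · have harr : arr = [] := by
      cases hpre with
      | inl h => exact h
      | inr h => exact absurd (by omega : 0 < nc.toNat) hk
    subst harr
    have hnc : nc ≤ 0 := by omega
    have hrange : PySem.List.pyRange 0 nc = [] := PySem.List.pyRange_one_eq_nil hnc
    have hk0 : nc.toNat = 0 := by omega
    rw [hrange, hk0]
    rfl
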